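-- pv_equiv track=rewrite | github.com/kamilludwinski/aoc | 2015/25/main.py | code_at
-- ===== SOURCE A (Python) =====
-- _MOD = 33_554_393
--
-- _MUL = 252_533
--
-- _START = 20_151_125
--
-- def code_at(target_row: int, target_col: int) -> int:
--     r, c = 1, 1
--     x = _START
--     while (r, c) != (target_row, target_col):
--         x = (x * _MUL) % _MOD
--         if r > 1:
--             r -= 1
--             c += 1
--         else:
--             r = c + 1
--             c = 1
--     return x
-- ===== SOURCE B (Python) =====
-- _MOD = 33_554_393
--
-- _MUL = 252_533
--
-- _START = 20_151_125
--
--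
-- def code_at(target_row: int, target_col: int) -> int:
--     # Closed form: the diagonal containing (r, c) is s = r + c; the cell's
--     # 1-based index in diagonal order is T(s-2) + c where T(n) = n(n+1)/2.
--     s = target_row + target_col
--     index = (s - 2) * (s - 1) // 2 + target_col
--     return (_START * pow(_MUL, index - 1, _MOD)) % _MOD
-- ===== Notes on version B (the rewrite author's own statement) =====
-- stated objective: faster
-- what changed: Replaces the step-by-step diagonal walk (one modular multiplication per cell up to the target) with the closed-form diagonal index plus modular exponentiation pow(_MUL, index-1, _MOD).
import Mathlib
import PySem

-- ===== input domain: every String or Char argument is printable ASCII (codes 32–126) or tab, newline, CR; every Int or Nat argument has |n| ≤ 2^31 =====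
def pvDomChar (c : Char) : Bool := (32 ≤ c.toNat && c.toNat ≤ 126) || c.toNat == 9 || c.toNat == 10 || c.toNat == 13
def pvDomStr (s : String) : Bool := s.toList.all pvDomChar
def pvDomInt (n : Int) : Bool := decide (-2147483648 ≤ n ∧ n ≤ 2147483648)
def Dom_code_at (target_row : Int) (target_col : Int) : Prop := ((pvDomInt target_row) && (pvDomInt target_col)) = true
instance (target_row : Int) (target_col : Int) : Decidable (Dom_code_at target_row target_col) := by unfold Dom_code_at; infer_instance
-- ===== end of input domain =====

-- B replaces A's cell-by-cell diagonal walk by the closed-form diagonal index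
-- and modular exponentiation (objective: faster, asymptotic).


-- ===== PORT A =====
-- the while loop, as fuel recursion; the fuel is only a totality guard
-- (on Pre_ it equals the number of iterations the Python loop performs).
def codeLoop (x r c : Int) (tr tc : Int) : Nat → Int
  | 0 => x
  | fuel + 1 =>
    if r = tr ∧ c = tc then x
    else
      let x' := (x * 252533) % 33554393
      if r > 1 then codeLoop x' (r - 1) (c + 1) tr tc fuel
      else codeLoop x' (c + 1) 1 tr tc fuel

def code_at (target_row : Int) (target_col : Int) : Int :=
  codeLoop 20151125 1 1 target_row target_col
    ((PySem.Int.floordiv ((target_row + target_col - 2) * (target_row + target_col - 1)) 2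
      + target_col - 1).toNat)

-- ===== PORT B =====
def code_at_alt (target_row : Int) (target_col : Int) : Int :=
  let s := target_row + target_col
  let index := PySem.Int.floordiv ((s - 2) * (s - 1)) 2 + target_col
  (20151125 * PySem.Int.powMod 252533 (index - 1).toNat 33554393) % 33554393

-- ===== PRECONDITION & SPEC =====
-- A's while loop never terminates when target_row < 1 or target_col < 1
-- (the walk only visits cells with positive coordinates), so those inputs are excluded.
def Pre_code_at (target_row : Int) (target_col : Int) : Prop :=
  1 ≤ target_row ∧ 1 ≤ target_col
instance (target_row : Int) (target_col : Int) : Decidable (Pre_code_at target_row target_col) := by unfold Pre_code_at; infer_instance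
def pvWitness_code_at : Int × Int := (3, 4)
def Spec_code_at (target_row : Int) (target_col : Int) (out : Int) : Prop := out = code_at_alt target_row target_col
instance (target_row : Int) (target_col : Int) (out : Int) : Decidable (Spec_code_at target_row target_col out) := by unfold Spec_code_at; infer_instance

-- ===== CLAIM (what is proved, stated in full; the proofs are below) =====
def Claim_equal_code_at : Prop := ∀ (target_row : Int) (target_col : Int), Dom_code_at target_row target_col → Pre_code_at target_row target_col → Spec_code_at target_row target_col (code_at target_row target_col)

-- ===== LEMMAS AND PROOFS =====

-- the 1-based diagonal index of cell (r, c)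
def pvIdx (r c : Int) : Int :=
  PySem.Int.floordiv ((r + c - 2) * (r + c - 1)) 2 + c

lemma pvFloordiv_two_mul (k : Int) : PySem.Int.floordiv (2 * k) 2 = k := by
  simp [PySem.Int.floordiv, Int.mul_fdiv_cancel_left _ (by norm_num : (2:Int) ≠ 0)]

lemma pvEven_consec (n : Int) : ∃ k, n * (n + 1) = 2 * k ∧ 0 ≤ k := by
  rcases Int.even_mul_succ_self n with ⟨k, hk⟩
  exact ⟨k, by omega, by nlinarith [sq_nonneg (2 * n + 1)]⟩

lemma pvIdx_step_up (r c : Int) : pvIdx (r - 1) (c + 1) = pvIdx r c + 1 := by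
  unfold pvIdx
  have : (r - 1) + (c + 1) - 2 = r + c - 2 := by ring
  rw [this]
  have : (r - 1) + (c + 1) - 1 = r + c - 1 := by ring
  rw [this]; ring

lemma pvIdx_step_wrap (c : Int) : pvIdx (c + 1) 1 = pvIdx 1 c + 1 := by
  unfold pvIdx
  obtain ⟨k, hk, -⟩ := pvEven_consec (c - 1)
  have h1 : ((c + 1) + 1 - 2) * ((c + 1) + 1 - 1) = 2 * (k + c) := by nlinarith
  have h2 : (1 + c - 2) * (1 + c - 1) = 2 * k := by nlinarith
  rw [h1, h2, pvFloordiv_two_mul, pvFloordiv_two_mul]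

lemma pvIdx_ge_one (r c : Int) (hc : 1 ≤ c) : 1 ≤ pvIdx r c := by
  unfold pvIdx
  obtain ⟨k, hk, hk0⟩ := pvEven_consec (r + c - 2)
  have hk' : (r + c - 2) * (r + c - 1) = 2 * k := by nlinarith
  rw [hk', pvFloordiv_two_mul]; omega

lemma pvCodeLoop_eq (tr tc : Int) (htr : 1 ≤ tr) (htc : 1 ≤ tc) :
    ∀ (fuel : Nat) (x r c : Int), 1 ≤ r → 1 ≤ c →
    (fuel : Int) = pvIdx tr tc - pvIdx r c →
    codeLoop x r c tr tc fuel =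
      if fuel = 0 then x else (x * 252533 ^ fuel) % 33554393 := by
  intro fuel
  induction fuel with
  | zero =>
    intro x r c _ _ _
    simp [codeLoop]
  | succ n ih =>
    intro x r c hr hc hfuel
    have hlt : pvIdx r c < pvIdx tr tc := by push_cast at hfuel; omega
    have hne : ¬ (r = tr ∧ c = tc) := by
      rintro ⟨rfl, rfl⟩; omega
    simp only [codeLoop, if_neg hne]
    by_cases hgt : r > 1
    · rw [if_pos hgt]
      rw [ih ((x * 252533) % 33554393) (r - 1) (c + 1) (by omega) (by omega)
        (by rw [pvIdx_step_up r c]; push_cast at hfuel ⊢; omega)]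
      rcases Nat.eq_zero_or_pos n with rfl | hn
      · simp [pow_succ]
      · rw [if_neg (by omega), if_neg (by omega)]
        rw [Int.mul_emod ((x * 252533) % 33554393), Int.emod_emod_of_dvd _ (by norm_num),
          ← Int.mul_emod, mul_assoc, ← pow_succ']
    · rw [if_neg hgt]
      have hr1 : r = 1 := by omega
      subst hr1
      rw [ih ((x * 252533) % 33554393) (c + 1) 1 (by omega) (by omega)
        (by rw [pvIdx_step_wrap c]; push_cast at hfuel ⊢; omega)]
      rcases Nat.eq_zero_or_pos n with rfl | hn
      · simp [pow_succ]
      · rw [if_neg (by omega), if_neg (by omega)]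
        rw [Int.mul_emod ((x * 252533) % 33554393), Int.emod_emod_of_dvd _ (by norm_num),
          ← Int.mul_emod, mul_assoc, ← pow_succ']

lemma pvIdx_one_one : pvIdx 1 1 = 1 := by decide

-- ===== VERDICT (by name: the statement is the Claim_ definition above) =====
theorem code_at_spec : Claim_equal_code_at := by
  intro tr tc _ ⟨htr, htc⟩
  unfold Spec_code_at code_at code_at_alt
  have hidx : 1 ≤ pvIdx tr tc := pvIdx_ge_one tr tc htc
  have hfuel : ((pvIdx tr tc - 1).toNat : Int) = pvIdx tr tc - pvIdx 1 1 := by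
    rw [pvIdx_one_one]; omega
  have hA := pvCodeLoop_eq tr tc htr htc (pvIdx tr tc - 1).toNat 20151125 1 1
    (by norm_num) (by norm_num) hfuel
  have hfuel_eq : (PySem.Int.floordiv ((tr + tc - 2) * (tr + tc - 1)) 2 + tc - 1).toNat
      = (pvIdx tr tc - 1).toNat := by unfold pvIdx; ring_nf
  rw [hfuel_eq, hA]
  have hBidx : PySem.Int.floordiv ((tr + tc - 2) * (tr + tc - 1)) 2 + tc = pvIdx tr tc := rfl
  simp only [hBidx]
  rw [PySem.Int.powMod_eq]
  rw [show PySem.Int.mod ((252533 : Int) ^ (pvIdx tr tc - 1).toNat) 33554393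
      = (252533 : Int) ^ (pvIdx tr tc - 1).toNat % 33554393 by
    unfold PySem.Int.mod; rw [Int.fmod_eq_emod]; simp]
  rcases eq_or_lt_of_le hidx with heq | hlt
  · rw [if_pos (by omega), ← heq]
    norm_num
  · rw [if_neg (by omega)]
    conv_lhs => rw [Int.mul_emod]
    conv_rhs => rw [Int.mul_emod]
    rw [Int.emod_emod_of_dvd _ dvd_rfl]
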